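-- pv_equiv track=rewrite | github.com/ChampionTej05/LeetCodeChallenges | maximum_sum_good_subarray.py | maxGoodSubArraySum
-- ===== SOURCE A (Python) =====
-- def maxGoodSubArraySum(nums, k):
--     maxSum = -10**20
--     mapper = {} # to hold the minimum prefix sum of all target indices
--     prefixSum = [0]
--     for num in nums:
--         prefixSum.append(prefixSum[-1]+num)
--
--     for j in range(len(nums)):
--         expectedValue1 = nums[j]-k
--         expectedValue2 = nums[j]+k
--
--         if expectedValue1 in mapper:
--             maxSum = max(maxSum, prefixSum[j+1]-mapper[expectedValue1])
--         if expectedValue2 in mapper: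
--             maxSum = max(maxSum, prefixSum[j+1]-mapper[expectedValue2])
--
--         # Update the mapper for current sum
--         # prefix[i] --> sum of all indices before i
--
--         if nums[j] in mapper:
--             mapper[nums[j]] = min(mapper[nums[j]], prefixSum[j])
--         else:
--             mapper[nums[j]] = prefixSum[j]
--
--     return maxSum if maxSum != -10**20 else 0
-- ===== SOURCE B (Python) =====
-- def maxGoodSubArraySum(nums, k):
--     # Different algorithm: bucket the indices by value, then for each value v and each
--     # partner value w in {v-k, v+k} run a two-pointer merge over the two ascending
--     # index lists, keeping the minimum prefix sum among start indices already passed.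
--     positions = {}
--     for i, x in enumerate(nums):
--         positions.setdefault(x, []).append(i)
--     pref = [0]
--     for x in nums:
--         pref.append(pref[-1] + x)
--     NEG = -10**20
--     best = NEG
--     for v, ends in positions.items():
--         for w in {v - k, v + k}:
--             starts = positions.get(w)
--             if starts is None:
--                 continue
--             si = 0
--             mn = None
--             for j in ends:
--                 while si < len(starts) and starts[si] < j:
--                     if mn is None or pref[starts[si]] < mn:
--                         mn = pref[starts[si]]
--                     si += 1
--                 if mn is not None and pref[j + 1] - mn > best:
--                     best = pref[j + 1] - mn
--     return best if best != NEG else 0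
-- ===== Notes on version B (the rewrite author's own statement) =====
-- stated objective: alternative
-- what changed: Replaced A's left-to-right scan with a running hash map of minimum prefix sums by a value-bucketing algorithm: group the indices by element value, then for each value v and each partner value in {v-k, v+k} run a two-pointer merge of the two ascending index lists, tracking the minimum prefix sum over start indices already passed.
import Mathlib
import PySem

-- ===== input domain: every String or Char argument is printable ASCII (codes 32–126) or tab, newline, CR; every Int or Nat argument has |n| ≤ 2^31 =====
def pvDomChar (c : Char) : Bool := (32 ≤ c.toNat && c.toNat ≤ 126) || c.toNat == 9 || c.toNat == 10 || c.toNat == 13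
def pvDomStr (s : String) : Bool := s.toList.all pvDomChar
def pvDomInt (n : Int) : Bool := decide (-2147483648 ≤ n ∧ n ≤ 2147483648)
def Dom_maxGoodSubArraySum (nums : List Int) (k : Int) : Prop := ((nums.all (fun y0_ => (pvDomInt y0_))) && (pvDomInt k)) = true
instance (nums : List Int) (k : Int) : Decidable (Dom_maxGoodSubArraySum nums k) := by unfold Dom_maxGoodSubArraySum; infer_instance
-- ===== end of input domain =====

-- B uses a different algorithm: it buckets the indices by value, then for each value v and each
-- partner value w in {v-k, v+k} merges the two ascending index lists with a two-pointer scan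
-- (minimum prefix sum over start indices already passed); same return value as A's
-- single-pass min-prefix hash scan. Objective: alternative.

-- ===== PORT A =====
-- one iteration of A's second loop, at loop index j (indices are always in range, so pyGetD's
-- default 0 is never used; the getD after a contains-guard mirrors Python's guarded mapper[e])
def aStep (nums prefixSum : List Int) (k : Int)
    (s : Int × PySem.Dict Int Int) (j : Int) : Int × PySem.Dict Int Int :=
  let x := PySem.List.pyGetD nums j 0
  let e1 := x - k
  let e2 := x + k
  let m1 := if s.2.contains e1 then max s.1 (PySem.List.pyGetD prefixSum (j+1) 0 - s.2.getD e1 0) else s.1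
  let m2 := if s.2.contains e2 then max m1 (PySem.List.pyGetD prefixSum (j+1) 0 - s.2.getD e2 0) else m1
  let d := if s.2.contains x then s.2.insert x (min (s.2.getD x 0) (PySem.List.pyGetD prefixSum j 0))
           else s.2.insert x (PySem.List.pyGetD prefixSum j 0)
  (m2, d)

def maxGoodSubArraySum (nums : List Int) (k : Int) : Int :=
  let prefixSum := nums.foldl (fun ps num => ps ++ [PySem.List.pyGetD ps (-1) 0 + num]) [0]
  let res := (PySem.List.pyRange 0 (PySem.List.len nums) 1).foldl
      (aStep nums prefixSum k) (-(10:Int)^20, PySem.Dict.empty)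
  if res.1 ≠ -(10:Int)^20 then res.1 else 0

-- ===== PORT B =====
-- Python's 'if mn is None or pref[starts[si]] < mn: mn = pref[starts[si]]'
def bMnUpd (pref : List Int) (mn : Option Int) (i : Int) : Option Int :=
  match mn with
  | none => some (PySem.List.pyGetD pref i 0)
  | some m0 => if PySem.List.pyGetD pref i 0 < m0 then some (PySem.List.pyGetD pref i 0) else some m0

-- B's 'for j in ends' loop with the inner while (the pointer si into starts is the
-- takeWhile/dropWhile split of the not-yet-consumed suffix of starts)
def bScan (pref : List Int) : List Int → List Int → Option Int → Int → Int
  | [], _, _, best => best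
  | j :: ends, starts, mn, best =>
      let consumed := starts.takeWhile (fun i => decide (i < j))
      let rest := starts.dropWhile (fun i => decide (i < j))
      let mn' := consumed.foldl (bMnUpd pref) mn
      let best' := match mn' with
        | none => best
        | some m0 => if PySem.List.pyGetD pref (j+1) 0 - m0 > best then PySem.List.pyGetD pref (j+1) 0 - m0 else best
      bScan pref ends rest mn' best'

def maxGoodSubArraySum_alt (nums : List Int) (k : Int) : Int :=
  let positions := (PySem.List.enumerate nums).foldl
      (fun d p => d.modify p.2 [] (fun l => l ++ [p.1])) PySem.Dict.empty
  let pref := nums.foldl (fun ps x => ps ++ [PySem.List.pyGetD ps (-1) 0 + x]) [0]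
  let best := positions.items.foldl (fun best pr =>
      (PySem.Set.ofList [pr.1 - k, pr.1 + k]).foldl (fun best w =>
        match positions.get? w with
        | none => best
        | some starts => bScan pref pr.2 starts none best) best) (-(10:Int)^20)
  if best ≠ -(10:Int)^20 then best else 0

-- ===== PRECONDITION & SPEC =====
def Spec_maxGoodSubArraySum (nums : List Int) (k : Int) (out : Int) : Prop := out = maxGoodSubArraySum_alt nums k
instance (nums : List Int) (k : Int) (out : Int) : Decidable (Spec_maxGoodSubArraySum nums k out) := by unfold Spec_maxGoodSubArraySum; infer_instance

-- ===== CLAIM (what is proved, stated in full; the proofs are below) =====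
def Claim_equal_maxGoodSubArraySum : Prop := ∀ (nums : List Int) (k : Int), Dom_maxGoodSubArraySum nums k → Spec_maxGoodSubArraySum nums k (maxGoodSubArraySum nums k)

-- ===== LEMMAS AND PROOFS =====

-- Both results are characterised by the same three properties (Triple below): they dominate
-- the sentinel, they are the sentinel or the value of some good pair, and they dominate the
-- value of every good pair.  Two integers with that property are equal.

def psumN (nums : List Int) (t : Nat) : Int := (nums.take t).sum
def goodPair (nums : List Int) (k : Int) (i j : Nat) : Prop :=
  i < j ∧ j < nums.length ∧ (nums.getD i 0 = nums.getD j 0 - k ∨ nums.getD i 0 = nums.getD j 0 + k)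
def pval (nums : List Int) (i j : Nat) : Int := psumN nums (j+1) - psumN nums i
def Triple (nums : List Int) (k : Int) (x : Int) : Prop :=
  -(10:Int)^20 ≤ x ∧ (x = -(10:Int)^20 ∨ ∃ i j, goodPair nums k i j ∧ x = pval nums i j) ∧
  (∀ i j, goodPair nums k i j → pval nums i j ≤ x)

lemma triple_unique {nums : List Int} {k x y : Int}
    (hx : Triple nums k x) (hy : Triple nums k y) : x = y := by
  obtain ⟨hx0, hx1, hx2⟩ := hx
  obtain ⟨hy0, hy1, hy2⟩ := hy
  apply le_antisymm
  · rcases hx1 with h | ⟨i, j, hg, hv⟩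
    · omega
    · exact hv ▸ hy2 i j hg
  · rcases hy1 with h | ⟨i, j, hg, hv⟩
    · omega
    · exact hv ▸ hx2 i j hg

-- A's first loop builds exactly the prefix-sum scan
lemma prefix_foldl_eq_scanl : ∀ (nums acc : List Int) (x : Int),
    nums.foldl (fun ps num => ps ++ [PySem.List.pyGetD ps (-1) 0 + num]) (acc ++ [x])
      = acc ++ List.scanl (· + ·) x nums := by
  intro nums
  induction nums with
  | nil => intro acc x; simp
  | cons n ns ih =>
      intro acc x
      rw [List.foldl_cons, List.scanl_cons, PySem.List.pyGetD_neg_one_append_singleton,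
        ih (acc ++ [x]) (x + n)]
      simp

lemma scanl_getD : ∀ (nums : List Int) (x : Int) (j : Nat), j ≤ nums.length →
    (List.scanl (· + ·) x nums).getD j 0 = x + (nums.take j).sum := by
  intro nums
  induction nums with
  | nil =>
      intro x j h
      have hj : j = 0 := Nat.le_zero.mp h
      subst hj; simp
  | cons n ns ih =>
      intro x j h
      cases j with
      | zero => simp [List.scanl_cons]
      | succ j =>
          rw [List.scanl_cons, List.getD_cons_succ, ih (x + n) j (by simpa using h)]
          simp [List.take_succ_cons]
          ring

lemma pA_nat (nums : List Int) (t : Nat) (ht : t ≤ nums.length) :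
    PySem.List.pyGetD (List.scanl (· + ·) 0 nums) (t : Int) 0 = psumN nums t := by
  rw [PySem.List.pyGetD_natCast, scanl_getD nums 0 t ht]
  simp [psumN]

-- ===== A-side =====

def MapInv (nums : List Int) (j : Nat) (d : PySem.Dict Int Int) : Prop :=
  ∀ v : Int,
    (∀ p, d.get? v = some p →
      (∃ i, i < j ∧ nums.getD i 0 = v ∧ p = psumN nums i) ∧
      (∀ i, i < j → nums.getD i 0 = v → p ≤ psumN nums i)) ∧
    (d.get? v = none → ∀ i, i < j → nums.getD i 0 ≠ v)

def TripleUpTo (nums : List Int) (k : Int) (j : Nat) (x : Int) : Prop :=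
  -(10:Int)^20 ≤ x ∧
  (x = -(10:Int)^20 ∨ ∃ i j', goodPair nums k i j' ∧ j' < j ∧ x = pval nums i j') ∧
  (∀ i j', goodPair nums k i j' → j' < j → pval nums i j' ≤ x)

lemma a_fold_inv (nums : List Int) (k : Int) : ∀ j : Nat, j ≤ nums.length →
    MapInv nums j ((PySem.List.pyRange 0 (j : Int) 1).foldl
      (aStep nums (List.scanl (· + ·) 0 nums) k) (-(10:Int)^20, PySem.Dict.empty)).2 ∧
    TripleUpTo nums k j ((PySem.List.pyRange 0 (j : Int) 1).foldl
      (aStep nums (List.scanl (· + ·) 0 nums) k) (-(10:Int)^20, PySem.Dict.empty)).1 := by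
  intro j
  induction j with
  | zero =>
      intro _
      rw [show ((0:Nat):Int) = 0 from rfl, PySem.List.pyRange_one_eq_nil (le_refl 0)]
      simp only [List.foldl_nil]
      refine ⟨?_, le_refl _, Or.inl rfl, ?_⟩
      · intro v
        refine ⟨?_, ?_⟩
        · intro p hp; rw [PySem.Dict.get?_empty] at hp; cases hp
        · intro _ i hi; omega
      · intro i j' _ hj'; omega
  | succ j ihj =>
      intro hle
      have hjn : j < nums.length := hle
      have hj : j ≤ nums.length := le_of_lt hjn
      obtain ⟨ihd, ihm⟩ := ihj hj
      have hrange : PySem.List.pyRange 0 ((j+1 : Nat) : Int) 1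
          = PySem.List.pyRange 0 (j : Int) 1 ++ [(j : Int)] := by
        push_cast
        exact PySem.List.pyRange_one_succ_right (by positivity)
      rw [hrange, List.foldl_append, List.foldl_cons, List.foldl_nil]
      set s := (PySem.List.pyRange 0 (j : Int) 1).foldl
        (aStep nums (List.scanl (· + ·) 0 nums) k) (-(10:Int)^20, PySem.Dict.empty) with hs
      have hx : PySem.List.pyGetD nums (j : Int) 0 = nums.getD j 0 :=
        PySem.List.pyGetD_natCast nums j 0
      have hps : PySem.List.pyGetD (List.scanl (· + ·) 0 nums) (j : Int) 0 = psumN nums j :=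
        pA_nat nums j hj
      have hps1 : PySem.List.pyGetD (List.scanl (· + ·) 0 nums) ((j : Int)+1) 0
          = psumN nums (j+1) := by
        rw [show ((j : Int)+1) = ((j+1 : Nat) : Int) by push_cast; ring]
        exact pA_nat nums (j+1) hjn
      set x := nums.getD j 0 with hxd
      constructor
      · -- the mapper invariant at j+1
        intro v
        have hget : ((aStep nums (List.scanl (· + ·) 0 nums) k) s (j : Int)).2.get? v
            = if v = x then some (if s.2.contains x
                then min (s.2.getD x 0) (psumN nums j) else psumN nums j)
              else s.2.get? v := by
          simp only [aStep, hx, hps]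
          split_ifs with hc hv hv
          · rw [PySem.Dict.get?_insert, if_pos hv]
          · rw [PySem.Dict.get?_insert, if_neg hv]
          · rw [PySem.Dict.get?_insert, if_pos hv]
          · rw [PySem.Dict.get?_insert, if_neg hv]
        rw [hget]
        by_cases hv : v = x
        · rw [if_pos hv, hv]
          constructor
          · intro p hp
            rw [Option.some_inj] at hp
            by_cases hc : s.2.contains x = true
            · rw [if_pos hc] at hp
              have hsome : ∃ p0, s.2.get? x = some p0 := by
                rw [PySem.Dict.contains_eq_isSome_get?] at hc
                exact Option.isSome_iff_exists.mp hc
              obtain ⟨p0, hp0⟩ := hsome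
              have hgd : s.2.getD x 0 = p0 := by
                rw [PySem.Dict.getD_eq_get?_getD, hp0]; rfl
              obtain ⟨⟨i0, hi0, hvi0, hpi0⟩, hub⟩ := (ihd x).1 p0 hp0
              rw [hgd] at hp
              constructor
              · rcases le_total p0 (psumN nums j) with hmin | hmin
                · exact ⟨i0, lt_trans hi0 (Nat.lt_succ_self j), hvi0, by omega⟩
                · exact ⟨j, Nat.lt_succ_self j, hxd.symm, by rw [← hp]; omega⟩
              · intro i hi hvi
                rcases Nat.lt_succ_iff_lt_or_eq.mp hi with h | h
                · have := hub i h hvi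
                  omega
                · subst h; omega
            · rw [if_neg hc] at hp
              have hnone : s.2.get? x = none := by
                cases hg : s.2.get? x with
                | none => rfl
                | some p0 => rw [PySem.Dict.contains_eq_isSome_get?, hg] at hc; simp at hc
              have hno := (ihd x).2 hnone
              constructor
              · exact ⟨j, Nat.lt_succ_self j, hxd.symm, hp.symm⟩
              · intro i hi hvi
                rcases Nat.lt_succ_iff_lt_or_eq.mp hi with h | h
                · exact absurd hvi (hno i h)
                · subst h; omega
          · intro hcon; cases hcon
        · rw [if_neg hv]
          constructor
          · intro p hp
            obtain ⟨⟨i0, hi0, hvi0, hpi0⟩, hub⟩ := (ihd v).1 p hp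
            constructor
            · exact ⟨i0, lt_trans hi0 (Nat.lt_succ_self j), hvi0, hpi0⟩
            · intro i hi hvi
              rcases Nat.lt_succ_iff_lt_or_eq.mp hi with h | h
              · exact hub i h hvi
              · subst h; exact absurd (hvi.symm.trans hxd.symm) hv
          · intro hnone i hi
            rcases Nat.lt_succ_iff_lt_or_eq.mp hi with h | h
            · exact (ihd v).2 hnone i h
            · subst h; intro hvi; exact hv (hvi.symm.trans hxd.symm)
      · -- the best-so-far invariant at j+1
        obtain ⟨ihm0, ihm1, ihm2⟩ := ihm
        have hm2eq : ((aStep nums (List.scanl (· + ·) 0 nums) k) s (j : Int)).1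
            = (let m1 := if s.2.contains (x - k) then
                  max s.1 (psumN nums (j+1) - s.2.getD (x - k) 0) else s.1;
               if s.2.contains (x + k) then
                  max m1 (psumN nums (j+1) - s.2.getD (x + k) 0) else m1) := by
          simp only [aStep, hx, hps1]
        rw [hm2eq]
        have hcand : ∀ e : Int, s.2.contains e = true →
            (∃ i0, i0 < j ∧ nums.getD i0 0 = e ∧ s.2.getD e 0 = psumN nums i0) ∧
            (∀ i, i < j → nums.getD i 0 = e → s.2.getD e 0 ≤ psumN nums i) := by
          intro e hc
          rw [PySem.Dict.contains_eq_isSome_get?] at hc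
          obtain ⟨p0, hp0⟩ := Option.isSome_iff_exists.mp hc
          have hgd : s.2.getD e 0 = p0 := by
            rw [PySem.Dict.getD_eq_get?_getD, hp0]; rfl
          obtain ⟨⟨i0, hi0, hvi0, hpi0⟩, hub⟩ := (ihd e).1 p0 hp0
          exact ⟨⟨i0, hi0, hvi0, by omega⟩, fun i hi hvi => by have := hub i hi hvi; omega⟩
        have hmiss : ∀ e : Int, ¬ s.2.contains e = true →
            ∀ i, i < j → nums.getD i 0 ≠ e := by
          intro e hc
          have hnone : s.2.get? e = none := by
            cases hg : s.2.get? e with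
            | none => rfl
            | some p0 => rw [PySem.Dict.contains_eq_isSome_get?, hg] at hc; simp at hc
          exact (ihd e).2 hnone
        have hgood : ∀ i0, i0 < j → (nums.getD i0 0 = x - k ∨ nums.getD i0 0 = x + k) →
            goodPair nums k i0 j := by
          intro i0 hi0 hvi
          exact ⟨hi0, hjn, by rw [← hxd]; exact hvi⟩
        dsimp only
        split_ifs with hc1 hc2 hc2
        all_goals refine ⟨?_, ?_, ?_⟩
        -- NEG lower bound
        · exact le_trans ihm0 (le_trans (le_max_left _ _) (le_max_left _ _))
        · -- witness, both contains
          rcases max_cases (max s.1 (psumN nums (j+1) - s.2.getD (x - k) 0))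
              (psumN nums (j+1) - s.2.getD (x + k) 0) with ⟨hm, _⟩ | ⟨hm, _⟩
          · rw [hm]
            rcases max_cases s.1 (psumN nums (j+1) - s.2.getD (x - k) 0) with ⟨hm', _⟩ | ⟨hm', _⟩
            · rw [hm']
              rcases ihm1 with h | ⟨i, j', hg, hj', hv⟩
              · exact Or.inl h
              · exact Or.inr ⟨i, j', hg, Nat.lt_succ_of_lt hj', hv⟩
            · rw [hm']
              obtain ⟨⟨i0, hi0, hvi0, hpi0⟩, _⟩ := hcand (x - k) hc2
              exact Or.inr ⟨i0, j, hgood i0 hi0 (Or.inl hvi0), Nat.lt_succ_self j,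
                by rw [pval, hpi0]⟩
          · rw [hm]
            obtain ⟨⟨i0, hi0, hvi0, hpi0⟩, _⟩ := hcand (x + k) hc1
            exact Or.inr ⟨i0, j, hgood i0 hi0 (Or.inr hvi0), Nat.lt_succ_self j,
              by rw [pval, hpi0]⟩
        · -- upper bound, both contains
          intro i j' hg hj'
          rcases Nat.lt_succ_iff_lt_or_eq.mp hj' with h | h
          · exact le_trans (ihm2 i j' hg h)
              (le_trans (le_max_left _ _) (le_max_left _ _))
          · rw [h] at hg ⊢
            obtain ⟨hij, _, hrel⟩ := hg
            rcases hrel with hr | hr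
            · obtain ⟨_, hub⟩ := hcand (x - k) hc2
              have := hub i hij (by rw [← hxd] at hr; exact hr)
              have hle : pval nums i j ≤ psumN nums (j+1) - s.2.getD (x - k) 0 := by
                rw [pval]; omega
              exact le_trans hle (le_trans (le_max_right _ _) (le_max_left _ _))
            · obtain ⟨_, hub⟩ := hcand (x + k) hc1
              have := hub i hij (by rw [← hxd] at hr; exact hr)
              have hle : pval nums i j ≤ psumN nums (j+1) - s.2.getD (x + k) 0 := by
                rw [pval]; omega
              exact le_trans hle (le_max_right _ _)
        · exact le_trans ihm0 (le_max_left _ _)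
        · -- witness, only x+k present
          rcases max_cases s.1 (psumN nums (j+1) - s.2.getD (x + k) 0) with ⟨hm', _⟩ | ⟨hm', _⟩
          · rw [hm']
            rcases ihm1 with h | ⟨i, j', hg, hj', hv⟩
            · exact Or.inl h
            · exact Or.inr ⟨i, j', hg, Nat.lt_succ_of_lt hj', hv⟩
          · rw [hm']
            obtain ⟨⟨i0, hi0, hvi0, hpi0⟩, _⟩ := hcand (x + k) hc1
            exact Or.inr ⟨i0, j, hgood i0 hi0 (Or.inr hvi0), Nat.lt_succ_self j,
              by rw [pval, hpi0]⟩
        · -- upper bound, only x+k present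
          intro i j' hg hj'
          rcases Nat.lt_succ_iff_lt_or_eq.mp hj' with h | h
          · exact le_trans (ihm2 i j' hg h) (le_max_left _ _)
          · rw [h] at hg ⊢
            obtain ⟨hij, _, hrel⟩ := hg
            rcases hrel with hr | hr
            · exact absurd (by rw [← hxd] at hr; exact hr) (hmiss (x - k) hc2 i hij)
            · obtain ⟨_, hub⟩ := hcand (x + k) hc1
              have := hub i hij (by rw [← hxd] at hr; exact hr)
              have hle : pval nums i j ≤ psumN nums (j+1) - s.2.getD (x + k) 0 := by
                rw [pval]; omega
              exact le_trans hle (le_max_right _ _)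
        · exact le_trans ihm0 (le_max_left _ _)
        · -- witness, only x-k present
          rcases max_cases s.1 (psumN nums (j+1) - s.2.getD (x - k) 0) with ⟨hm', _⟩ | ⟨hm', _⟩
          · rw [hm']
            rcases ihm1 with h | ⟨i, j', hg, hj', hv⟩
            · exact Or.inl h
            · exact Or.inr ⟨i, j', hg, Nat.lt_succ_of_lt hj', hv⟩
          · rw [hm']
            obtain ⟨⟨i0, hi0, hvi0, hpi0⟩, _⟩ := hcand (x - k) hc2
            exact Or.inr ⟨i0, j, hgood i0 hi0 (Or.inl hvi0), Nat.lt_succ_self j,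
              by rw [pval, hpi0]⟩
        · -- upper bound, only x-k present
          intro i j' hg hj'
          rcases Nat.lt_succ_iff_lt_or_eq.mp hj' with h | h
          · exact le_trans (ihm2 i j' hg h) (le_max_left _ _)
          · rw [h] at hg ⊢
            obtain ⟨hij, _, hrel⟩ := hg
            rcases hrel with hr | hr
            · obtain ⟨_, hub⟩ := hcand (x - k) hc2
              have := hub i hij (by rw [← hxd] at hr; exact hr)
              have hle : pval nums i j ≤ psumN nums (j+1) - s.2.getD (x - k) 0 := by
                rw [pval]; omega
              exact le_trans hle (le_max_right _ _)
            · exact absurd (by rw [← hxd] at hr; exact hr) (hmiss (x + k) hc1 i hij)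
        · exact ihm0
        · -- witness, neither present
          rcases ihm1 with h | ⟨i, j', hg, hj', hv⟩
          · exact Or.inl h
          · exact Or.inr ⟨i, j', hg, Nat.lt_succ_of_lt hj', hv⟩
        · -- upper bound, neither present
          intro i j' hg hj'
          rcases Nat.lt_succ_iff_lt_or_eq.mp hj' with h | h
          · exact ihm2 i j' hg h
          · rw [h] at hg ⊢
            obtain ⟨hij, _, hrel⟩ := hg
            rcases hrel with hr | hr
            · exact absurd (by rw [← hxd] at hr; exact hr) (hmiss (x - k) hc2 i hij)
            · exact absurd (by rw [← hxd] at hr; exact hr) (hmiss (x + k) hc1 i hij)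

lemma a_triple (nums : List Int) (k : Int) :
    Triple nums k ((PySem.List.pyRange 0 (PySem.List.len nums) 1).foldl
      (aStep nums (List.scanl (· + ·) 0 nums) k) (-(10:Int)^20, PySem.Dict.empty)).1 := by
  rw [PySem.List.len_eq]
  obtain ⟨_, h0, h1, h2⟩ := a_fold_inv nums k nums.length (le_refl _)
  refine ⟨h0, ?_, ?_⟩
  · rcases h1 with h | ⟨i, j', hg, _, hv⟩
    · exact Or.inl h
    · exact Or.inr ⟨i, j', hg, hv⟩
  · intro i j hg
    exact h2 i j hg hg.2.1

-- ===== B-side =====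

-- the value list of the positions dict
def idxs (nums : List Int) (v : Int) : List Int :=
  ((PySem.List.enumerate nums).filter (fun p => p.2 == v)).map (·.1)

def posDict (nums : List Int) : PySem.Dict Int (List Int) :=
  (PySem.List.enumerate nums).foldl
      (fun d p => d.modify p.2 [] (fun l => l ++ [p.1])) PySem.Dict.empty

lemma posDict_fold_eq (nums : List Int) :
    posDict nums = ((PySem.List.enumerate nums).map (fun p => (p.2, p.1))).foldl
      (fun d q => d.modify q.1 [] (fun l => l ++ [q.2])) PySem.Dict.empty := by
  rw [List.foldl_map]
  rfl

lemma posDict_getD (nums : List Int) (v : Int) :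
    (posDict nums).getD v [] = idxs nums v := by
  rw [posDict_fold_eq, PySem.Dict.getD_foldl_modify_append, List.filter_map, List.map_map]
  simp only [PySem.Dict.getD_empty, List.nil_append, idxs]
  rfl

lemma posDict_keys (nums : List Int) :
    (posDict nums).keys = PySem.Set.ofList nums := by
  unfold posDict
  rw [PySem.Dict.keys_foldl_modify_key (PySem.List.enumerate nums) (fun p => p.2) []
      (fun _ p => fun l => l ++ [p.1]) PySem.Dict.empty]
  rw [PySem.List.map_snd_enumerate]
  simp [PySem.Set.update_nil_left]

lemma posDict_nodup (nums : List Int) : (posDict nums).keys.Nodup := by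
  unfold posDict
  exact PySem.Dict.nodup_keys_foldl_modify_key (PySem.List.enumerate nums) (fun p => p.2) []
      (fun _ p => fun l => l ++ [p.1]) PySem.Dict.empty (by simp)

lemma posDict_get? (nums : List Int) (v : Int) (h : v ∈ nums) :
    (posDict nums).get? v = some (idxs nums v) := by
  have hc : (posDict nums).contains v = true := by
    rw [PySem.Dict.contains_iff_mem_keys, posDict_keys]
    exact (PySem.Set.mem_ofList _ _).mpr h
  cases hg : (posDict nums).get? v with
  | none => rw [(PySem.Dict.get?_eq_none_iff_contains _ _).mp hg] at hc; cases hc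
  | some l =>
      have := posDict_getD nums v
      rw [PySem.Dict.getD_eq_get?_getD, hg] at this
      simp only [Option.getD_some] at this
      rw [this]

lemma posDict_get?_some (nums : List Int) (v : Int) (l : List Int)
    (h : (posDict nums).get? v = some l) : l = idxs nums v := by
  have := posDict_getD nums v
  rw [PySem.Dict.getD_eq_get?_getD, h] at this
  simpa using this

lemma posDict_items (nums : List Int) :
    (posDict nums).items = (PySem.Set.ofList nums).map (fun v => (v, idxs nums v)) := by
  rw [PySem.Dict.items_eq_map_keys (posDict nums) (posDict_nodup nums) [], posDict_keys]
  exact List.map_congr_left (fun v _ => by rw [posDict_getD])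

lemma mem_idxs (nums : List Int) (v i : Int) :
    i ∈ idxs nums v ↔ ∃ t : Nat, t < nums.length ∧ i = (t : Int) ∧ nums.getD t 0 = v := by
  unfold idxs
  simp only [List.mem_map, List.mem_filter, PySem.List.mem_enumerate_iff]
  constructor
  · rintro ⟨p, ⟨⟨t, ht, rfl⟩, hv⟩, rfl⟩
    refine ⟨t, ht, by simp, ?_⟩
    simp only [beq_iff_eq] at hv
    rw [List.getD_eq_getElem _ _ ht]
    exact hv
  · rintro ⟨t, ht, rfl, hv⟩
    refine ⟨((t : Int), nums[t]), ⟨⟨t, ht, by simp⟩, ?_⟩, rfl⟩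
    rw [List.getD_eq_getElem _ _ ht] at hv
    simp [hv]

lemma idxs_sorted (nums : List Int) (v : Int) : (idxs nums v).Pairwise (· < ·) := by
  unfold idxs
  exact ((PySem.List.pairwise_lt_enumerate nums 0).filter _).map _ (fun a b h => h)

-- invariant of the running minimum mn over the already-consumed start indices D
def MnInv (pref : List Int) (D : List Int) (mn : Option Int) : Prop :=
  (mn = none → D = []) ∧
  ∀ m, mn = some m → (∃ i ∈ D, m = PySem.List.pyGetD pref i 0) ∧
    (∀ i ∈ D, m ≤ PySem.List.pyGetD pref i 0)

lemma mnfold_inv (pref : List Int) : ∀ (l D : List Int) (mn : Option Int),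
    MnInv pref D mn → MnInv pref (D ++ l) (l.foldl (bMnUpd pref) mn) := by
  intro l
  induction l with
  | nil => intro D mn h; simpa using h
  | cons i l ih =>
      intro D mn h
      obtain ⟨h0, h1⟩ := h
      have hstep : MnInv pref (D ++ [i]) (bMnUpd pref mn i) := by
        cases mn with
        | none =>
            have hD : D = [] := h0 rfl
            subst hD
            refine ⟨by simp [bMnUpd], ?_⟩
            intro m hm
            simp only [bMnUpd] at hm
            rw [Option.some_inj] at hm
            subst hm
            refine ⟨⟨i, by simp, rfl⟩, ?_⟩
            intro i' hi'
            simp only [List.nil_append, List.mem_singleton] at hi'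
            subst hi'
            exact le_refl _
        | some m0 =>
            obtain ⟨⟨iw, hiw, hw⟩, hub⟩ := h1 m0 rfl
            simp only [bMnUpd]
            split_ifs with hlt
            · refine ⟨by simp, ?_⟩
              intro m hm
              rw [Option.some_inj] at hm
              subst hm
              refine ⟨⟨i, by simp, rfl⟩, ?_⟩
              intro i' hi'
              rcases List.mem_append.mp hi' with h | h
              · exact le_trans (le_of_lt hlt) (hub i' h)
              · simp at h; subst h; exact le_refl _
            · refine ⟨by simp, ?_⟩
              intro m hm
              rw [Option.some_inj] at hm
              subst hm
              refine ⟨⟨iw, List.mem_append_left _ hiw, hw⟩, ?_⟩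
              intro i' hi'
              rcases List.mem_append.mp hi' with h | h
              · exact hub i' h
              · simp at h; subst h; omega
      have := ih (D ++ [i]) (bMnUpd pref mn i) hstep
      simpa [List.append_assoc] using this

lemma sorted_dropWhile_ge : ∀ (l : List Int) (j : Int), l.Pairwise (· < ·) →
    ∀ x ∈ l.dropWhile (fun i => decide (i < j)), ¬ x < j := by
  intro l
  induction l with
  | nil => simp
  | cons a l ih =>
      intro j h
      rw [List.pairwise_cons] at h
      intro x hx
      rw [List.dropWhile_cons] at hx
      split_ifs at hx with ha
      · exact ih j h.2 x hx
      · simp only [decide_eq_true_eq] at ha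
        rcases List.mem_cons.mp hx with h' | h'
        · subst h'; exact ha
        · have := h.1 x h'
          omega

lemma bScan_triple (pref : List Int) : ∀ (ends starts D : List Int) (mn : Option Int) (best : Int),
    ends.Pairwise (· < ·) → starts.Pairwise (· < ·) →
    (∀ d ∈ D, ∀ j ∈ ends, d < j) →
    MnInv pref D mn →
    best ≤ bScan pref ends starts mn best ∧
    (bScan pref ends starts mn best = best ∨
      ∃ i ∈ D ++ starts, ∃ j ∈ ends, i < j ∧
        bScan pref ends starts mn best = PySem.List.pyGetD pref (j+1) 0 - PySem.List.pyGetD pref i 0) ∧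
    (∀ i ∈ D ++ starts, ∀ j ∈ ends, i < j →
      PySem.List.pyGetD pref (j+1) 0 - PySem.List.pyGetD pref i 0 ≤ bScan pref ends starts mn best) := by
  intro ends
  induction ends with
  | nil =>
      intro starts D mn best _ _ _ _
      exact ⟨le_refl _, Or.inl rfl, by simp⟩
  | cons j ends ih =>
      intro starts D mn best hE hS hD hmn
      rw [List.pairwise_cons] at hE
      obtain ⟨hjlt, hE'⟩ := hE
      set consumed := starts.takeWhile (fun i => decide (i < j)) with hcons
      set rest := starts.dropWhile (fun i => decide (i < j)) with hrest
      set mn' := consumed.foldl (bMnUpd pref) mn with hmn'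
      set best' := (match mn' with
        | none => best
        | some m0 => if PySem.List.pyGetD pref (j+1) 0 - m0 > best then PySem.List.pyGetD pref (j+1) 0 - m0 else best) with hbest'
      have hsplit : consumed ++ rest = starts := List.takeWhile_append_dropWhile
      have heq : bScan pref (j :: ends) starts mn best = bScan pref ends rest mn' best' := by
        rw [bScan]
      have hconsLt : ∀ c ∈ consumed, c < j := by
        intro c hc
        have := List.mem_takeWhile_imp hc
        simpa using this
      have hrestGe : ∀ r ∈ rest, ¬ r < j := sorted_dropWhile_ge starts j hS
      have hrestS : rest.Pairwise (· < ·) := hS.sublist (List.dropWhile_sublist _)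
      have hmnI : MnInv pref (D ++ consumed) mn' := mnfold_inv pref consumed D mn hmn
      have hDlt : ∀ d ∈ D ++ consumed, d < j := by
        intro d hd
        rcases List.mem_append.mp hd with h | h
        · exact hD d h j (List.mem_cons_self ..)
        · exact hconsLt d h
      have hD' : ∀ d ∈ D ++ consumed, ∀ j' ∈ ends, d < j' := by
        intro d hd j' hj'
        exact lt_trans (hDlt d hd) (hjlt j' hj')
      -- the step from best to best'
      have s1 : best ≤ best' := by
        rw [hbest']
        cases mn' with
        | none => exact le_refl _
        | some m0 => dsimp only; split_ifs with hgt; omega; exact le_refl _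
      have s2 : best' = best ∨ ∃ i ∈ D ++ consumed, i < j ∧
          best' = PySem.List.pyGetD pref (j+1) 0 - PySem.List.pyGetD pref i 0 := by
        rw [hbest']
        cases hm : mn' with
        | none => exact Or.inl rfl
        | some m0 =>
            dsimp only
            split_ifs with hgt
            · obtain ⟨⟨iw, hiw, hw⟩, _⟩ := hmnI.2 m0 hm
              exact Or.inr ⟨iw, hiw, hDlt iw hiw, by rw [hw]⟩
            · exact Or.inl rfl
      have s3 : ∀ i ∈ D ++ consumed,
          PySem.List.pyGetD pref (j+1) 0 - PySem.List.pyGetD pref i 0 ≤ best' := by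
        intro i hi
        cases hm : mn' with
        | none =>
            have := hmnI.1 hm
            rw [this] at hi
            cases hi
        | some m0 =>
            obtain ⟨_, hub⟩ := hmnI.2 m0 hm
            have hle := hub i hi
            rw [hbest', hm]
            dsimp only
            split_ifs with hgt <;> omega
      obtain ⟨g1, g2, g3⟩ := ih rest (D ++ consumed) mn' best' hE' hrestS hD' hmnI
      rw [heq]
      have hmemEq : ∀ x : Int, x ∈ D ++ starts ↔ x ∈ (D ++ consumed) ++ rest := by
        intro x
        rw [List.append_assoc, hsplit]
      refine ⟨le_trans s1 g1, ?_, ?_⟩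
      · rcases g2 with hg | ⟨i, hi, j', hj', hlt, hv⟩
        · rw [hg]
          rcases s2 with h | ⟨i, hi, hlt, hv⟩
          · exact Or.inl h
          · exact Or.inr ⟨i, (hmemEq i).mpr (List.mem_append_left _ hi),
              j, List.mem_cons_self .., hlt, hv⟩
        · exact Or.inr ⟨i, (hmemEq i).mpr hi, j', List.mem_cons_of_mem _ hj', hlt, hv⟩
      · intro i hi j' hj' hlt
        rcases List.mem_cons.mp hj' with h | h
        · subst h
          have hiDC : i ∈ D ++ consumed := by
            rcases List.mem_append.mp ((hmemEq i).mp hi) with h | h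
            · exact h
            · exact absurd hlt (hrestGe i h)
          exact le_trans (s3 i hiDC) g1
        · exact g3 i ((hmemEq i).mp hi) j' h hlt

-- a fold of steps each of which can only raise its accumulator to one of its own candidates
lemma fold_step_triple {α : Type} (C : α → Int → Prop) (step : Int → α → Int) :
    ∀ (l : List α),
    (∀ b, ∀ t ∈ l, b ≤ step b t ∧ (step b t = b ∨ ∃ c, C t c ∧ step b t = c) ∧
      (∀ c, C t c → c ≤ step b t)) →
    ∀ (b : Int), b ≤ l.foldl step b ∧
      (l.foldl step b = b ∨ ∃ t ∈ l, ∃ c, C t c ∧ l.foldl step b = c) ∧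
      (∀ t ∈ l, ∀ c, C t c → c ≤ l.foldl step b) := by
  intro l
  induction l with
  | nil => intro _ b; refine ⟨le_refl b, Or.inl rfl, by simp⟩
  | cons t ts ih0 =>
      intro h b
      have ih := ih0 (fun b t ht => h b t (List.mem_cons_of_mem _ ht))
      obtain ⟨h0, h1, h2⟩ := h b t (List.mem_cons_self ..)
      obtain ⟨g0, g1, g2⟩ := ih (step b t)
      rw [List.foldl_cons]
      refine ⟨le_trans h0 g0, ?_, ?_⟩
      · rcases g1 with hg | ⟨t', ht', c, hc, hv⟩
        · rw [hg]
          rcases h1 with h | ⟨c, hc, hv⟩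
          · exact Or.inl h
          · exact Or.inr ⟨t, by simp, c, hc, hv⟩
        · exact Or.inr ⟨t', by simp [ht'], c, hc, hv⟩
      · intro t' ht' c hc
        rcases List.mem_cons.mp ht' with h | h
        · exact le_trans (h2 c (h ▸ hc)) g0
        · exact g2 t' h c hc

-- the body of B's 'for w in {v-k, v+k}' loop, for one partner value w
lemma inner_step_triple (nums : List Int) (k v : Int) (b w : Int)
    (hw : w ∈ ([v - k, v + k] : List Int)) :
    b ≤ (match (posDict nums).get? w with
          | none => b
          | some starts => bScan (List.scanl (· + ·) 0 nums) (idxs nums v) starts none b) ∧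
    ((match (posDict nums).get? w with
          | none => b
          | some starts => bScan (List.scanl (· + ·) 0 nums) (idxs nums v) starts none b) = b ∨
      ∃ c, (∃ ti tj, goodPair nums k ti tj ∧ nums.getD tj 0 = v ∧ nums.getD ti 0 = w ∧
              c = pval nums ti tj) ∧
        (match (posDict nums).get? w with
          | none => b
          | some starts => bScan (List.scanl (· + ·) 0 nums) (idxs nums v) starts none b) = c) ∧
    (∀ c, (∃ ti tj, goodPair nums k ti tj ∧ nums.getD tj 0 = v ∧ nums.getD ti 0 = w ∧
              c = pval nums ti tj) →
      c ≤ (match (posDict nums).get? w with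
          | none => b
          | some starts => bScan (List.scanl (· + ·) 0 nums) (idxs nums v) starts none b)) := by
  cases hg : (posDict nums).get? w with
  | none =>
      refine ⟨le_refl _, Or.inl rfl, ?_⟩
      rintro c ⟨ti, tj, ⟨hij, hjn, _⟩, _, hti, _⟩
      exfalso
      have hwmem : w ∈ nums := by
        rw [← hti, List.getD_eq_getElem _ _ (lt_trans hij hjn)]
        exact List.getElem_mem _
      rw [posDict_get? nums w hwmem] at hg
      cases hg
  | some starts =>
      have hst : starts = idxs nums w := posDict_get?_some nums w starts hg
      subst hst
      dsimp only
      have hmn0 : MnInv (List.scanl (· + ·) 0 nums) [] none :=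
        ⟨fun _ => rfl, fun m hm => by cases hm⟩
      obtain ⟨g1, g2, g3⟩ := bScan_triple (List.scanl (· + ·) 0 nums)
        (idxs nums v) (idxs nums w) [] none b
        (idxs_sorted nums v) (idxs_sorted nums w) (by simp) hmn0
      refine ⟨g1, ?_, ?_⟩
      · rcases g2 with h | ⟨i, hi, j, hj, hlt, hv⟩
        · exact Or.inl h
        · right
          rw [List.nil_append] at hi
          obtain ⟨ti, hti, rfl, htiv⟩ := (mem_idxs nums w i).mp hi
          obtain ⟨tj, htj, rfl, htjv⟩ := (mem_idxs nums v j).mp hj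
          have htilt : ti < tj := by exact_mod_cast hlt
          refine ⟨_, ⟨ti, tj, ⟨htilt, htj, ?_⟩, htjv, htiv, rfl⟩, ?_⟩
          · rw [htiv, htjv]
            rcases List.mem_cons.mp hw with h | h
            · exact Or.inl h
            · simp only [List.mem_singleton] at h
              exact Or.inr h
          · rw [hv, pval, ← pA_nat nums ti (le_of_lt (lt_trans htilt htj)),
              ← pA_nat nums (tj+1) htj]
            push_cast
            ring_nf
      · rintro c ⟨ti, tj, ⟨hij, hjn, _⟩, htjv, htiw, rfl⟩
        have h1 : (ti : Int) ∈ [] ++ idxs nums w := by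
          rw [List.nil_append, mem_idxs]
          exact ⟨ti, lt_trans hij hjn, rfl, htiw⟩
        have h2 : (tj : Int) ∈ idxs nums v := by
          rw [mem_idxs]
          exact ⟨tj, hjn, rfl, htjv⟩
        have hle := g3 (ti : Int) h1 (tj : Int) h2 (by exact_mod_cast hij)
        have hv1 : pval nums ti tj
            = PySem.List.pyGetD (List.scanl (· + ·) 0 nums) ((tj:Int)+1) 0
              - PySem.List.pyGetD (List.scanl (· + ·) 0 nums) (ti:Int) 0 := by
          rw [pval, ← pA_nat nums ti (le_of_lt (lt_trans hij hjn)), ← pA_nat nums (tj+1) hjn]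
          push_cast
          ring_nf
        rw [hv1]
        exact hle

lemma b_triple (nums : List Int) (k : Int) :
    Triple nums k ((posDict nums).items.foldl (fun best pr =>
      (PySem.Set.ofList [pr.1 - k, pr.1 + k]).foldl (fun best w =>
        match (posDict nums).get? w with
        | none => best
        | some starts => bScan (List.scanl (· + ·) 0 nums) pr.2 starts none best) best)
      (-(10:Int)^20)) := by
  rw [posDict_items]
  obtain ⟨o1, o2, o3⟩ := fold_step_triple
    (fun pr c => ∃ ti tj, goodPair nums k ti tj ∧ nums.getD tj 0 = pr.1 ∧ c = pval nums ti tj)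
    (fun best pr => (PySem.Set.ofList [pr.1 - k, pr.1 + k]).foldl (fun best w =>
        match (posDict nums).get? w with
        | none => best
        | some starts => bScan (List.scanl (· + ·) 0 nums) pr.2 starts none best) best)
    ((PySem.Set.ofList nums).map (fun v => (v, idxs nums v)))
    (by
      intro b pr hpr
      obtain ⟨v, hv, rfl⟩ := List.mem_map.mp hpr
      obtain ⟨i1, i2, i3⟩ := fold_step_triple
        (fun w c => ∃ ti tj, goodPair nums k ti tj ∧ nums.getD tj 0 = v ∧
            nums.getD ti 0 = w ∧ c = pval nums ti tj)
        (fun best w =>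
          match (posDict nums).get? w with
          | none => best
          | some starts => bScan (List.scanl (· + ·) 0 nums) (idxs nums v) starts none best)
        (PySem.Set.ofList [v - k, v + k])
        (fun b w hw => inner_step_triple nums k v b w
          ((PySem.Set.mem_ofList _ w).mp hw)) b
      refine ⟨i1, ?_, ?_⟩
      · rcases i2 with h | ⟨w, _, c, ⟨ti, tj, hg, htj, _, hc⟩, hval⟩
        · exact Or.inl h
        · exact Or.inr ⟨c, ⟨ti, tj, hg, htj, hc⟩, hval⟩
      · rintro c ⟨ti, tj, hg, htj, rfl⟩
        have hw0 : nums.getD ti 0 ∈ ([v - k, v + k] : List Int) := by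
          rcases hg.2.2 with h | h
          · rw [h, htj]; exact List.mem_cons_self ..
          · rw [h, htj]; simp
        exact i3 (nums.getD ti 0) ((PySem.Set.mem_ofList _ _).mpr hw0) _
          ⟨ti, tj, hg, htj, rfl, rfl⟩)
    (-(10:Int)^20)
  refine ⟨o1, ?_, ?_⟩
  · rcases o2 with h | ⟨pr, _, c, ⟨ti, tj, hg, _, hc⟩, hval⟩
    · exact Or.inl h
    · exact Or.inr ⟨ti, tj, hg, hc ▸ hval⟩
  · intro i j hg
    have hvmem : nums.getD j 0 ∈ PySem.Set.ofList nums := by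
      rw [PySem.Set.mem_ofList]
      rw [List.getD_eq_getElem _ _ hg.2.1]
      exact List.getElem_mem _
    exact o3 (nums.getD j 0, idxs nums (nums.getD j 0))
      (List.mem_map.mpr ⟨_, hvmem, rfl⟩) _ ⟨i, j, hg, rfl, rfl⟩

-- ===== VERDICT (by name: the statement is the Claim_ definition above) =====
theorem maxGoodSubArraySum_spec : Claim_equal_maxGoodSubArraySum := by
  intro nums k _
  show maxGoodSubArraySum nums k = maxGoodSubArraySum_alt nums k
  simp only [maxGoodSubArraySum, maxGoodSubArraySum_alt]
  have hpre : nums.foldl (fun ps num => ps ++ [PySem.List.pyGetD ps (-1) 0 + num]) [0]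
      = List.scanl (· + ·) 0 nums := by
    simpa using prefix_foldl_eq_scanl nums [] 0
  rw [hpre]
  rw [show (PySem.List.enumerate nums).foldl
      (fun d p => d.modify p.2 [] (fun l => l ++ [p.1])) PySem.Dict.empty = posDict nums from rfl]
  have hcore := triple_unique (a_triple nums k) (b_triple nums k)
  rw [hcore]
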